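-- pv_equiv track=rewrite | github.com/pypi-data/pypi-mirror-354 | packages/ataraxis-automation/ataraxis_automation-5.0.0.tar.gz/ataraxis_automation-5.0.0/src/ataraxis_automation/automation.py | strip_versions
-- ===== SOURCE A (Python) =====
-- def strip_versions(requirements: list[str]) -> list[str]:
--     """Strips version specifiers from the package names in the input list of dependencies.
--
--     This method is used to transform the list of packages with version specifiers into a list of names. In turn, this is
--     used to force uv to always reinstall pip dependencies and the base project, without reinstalling transient
--     dependencies. In turn, this maximizes the use of mamba/conda used for transient and non-pip dependencies, assuming
--     there is very likely an overlap between dependencies that can be installed with pip and conda for every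
--     project.
--
--     Args:
--         requirements: The list of strings that store dependency package names with version specifiers.
--
--     Returns:
--         The list of string package names without version specifiers.
--     """
--     # Common version specifiers that need to be stripped to get only the package names
--     version_patterns = [">=", "<=", "==", "!=", "~=", ">", "<", "==="]
--
--     cleaned = []
--     for req in requirements:
--         # Finds the first occurrence of any version specifier
--         first_spec_index = len(req)  # Defaults to full length if no specifier found
--         for pattern in version_patterns:
--             pos = req.find(pattern)
--             if pos != -1 and pos < first_spec_index:
--                 first_spec_index = pos
--
--         # Takes everything before the version specifier, stripped of whitespace. Also strips the first set of
--         # double-quotes from the resultant string. The second set at the end of the string is stripped by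
--         # the 'strip' method.
--         cleaned.append(f"{req[:first_spec_index].strip()}"[1:])
--
--     return cleaned
-- ===== SOURCE B (Python) =====
-- def strip_versions(requirements: list[str]) -> list[str]:
--     """Single left-to-right character scan per string instead of eight repeated substring searches."""
--     def cut(req):
--         n = len(req)
--         idx = n
--         for i, ch in enumerate(req):
--             if ch in '<>' or (ch in '=!~' and i + 1 < n and req[i + 1] == '='):
--                 idx = i
--                 break
--         return req[:idx].strip()[1:]
--     return [cut(req) for req in requirements]
-- ===== Notes on version B (the rewrite author's own statement) =====
-- stated objective: faster
-- what changed: Replaces A's eight separate substring searches per string (find per pattern, keeping the minimum hit) with one left-to-right character scan that stops at the first position where a specifier can start ('<', '>', or one of '=', '!', '~' followed by '='), then slices/strips exactly as A does.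
import Mathlib
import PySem

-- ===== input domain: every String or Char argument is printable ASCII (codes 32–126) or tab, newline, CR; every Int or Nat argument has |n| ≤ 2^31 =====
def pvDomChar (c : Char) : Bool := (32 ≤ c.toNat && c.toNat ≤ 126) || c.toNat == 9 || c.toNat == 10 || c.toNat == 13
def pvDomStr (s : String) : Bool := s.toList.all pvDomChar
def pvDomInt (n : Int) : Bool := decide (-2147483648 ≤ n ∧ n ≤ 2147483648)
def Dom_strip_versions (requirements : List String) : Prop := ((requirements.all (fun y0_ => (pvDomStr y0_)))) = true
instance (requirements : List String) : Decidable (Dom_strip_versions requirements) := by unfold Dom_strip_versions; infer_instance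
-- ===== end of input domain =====

-- B replaces A's eight repeated substring searches per string by one left-to-right
-- character scan finding the first position where a specifier can start (alternative
-- decomposition, same result; return value only, no mutation involved).

-- ===== PORT A =====
def strip_versions (requirements : List String) : List String :=
  let version_patterns : List String := [">=", "<=", "==", "!=", "~=", ">", "<", "==="]
  requirements.foldl (fun cleaned req =>
    let first_spec_index : Int :=
      version_patterns.foldl (fun first pattern =>
        let pos := PySem.Str.find req pattern
        if pos ≠ -1 ∧ pos < first then pos else first) (PySem.Str.len req)
    cleaned ++ [PySem.Str.slice (PySem.Str.strip (PySem.Str.slice req none (some first_spec_index))) (some 1) none]) []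

-- ===== PORT B =====
-- one pass over the characters: index of the first position where a version
-- specifier can start, or the length of the string if there is none
def specScan : List Char → Nat
  | [] => 0
  | c :: cs =>
    if c = '<' ∨ c = '>' then 0
    else if (c = '=' ∨ c = '!' ∨ c = '~') ∧ cs.head? = some '=' then 0
    else specScan cs + 1

def strip_versions_alt (requirements : List String) : List String :=
  requirements.map (fun req =>
    PySem.Str.slice (PySem.Str.strip (PySem.Str.slice req none (some (specScan req.toList : Int)))) (some 1) none)

-- ===== PRECONDITION & SPEC =====
def Spec_strip_versions (requirements : List String) (out : List String) : Prop := out = strip_versions_alt requirements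
instance (requirements : List String) (out : List String) : Decidable (Spec_strip_versions requirements out) := by unfold Spec_strip_versions; infer_instance

-- ===== CLAIM (what is proved, stated in full; the proofs are below) =====
def Claim_equal_strip_versions : Prop := ∀ (requirements : List String), Dom_strip_versions requirements → Spec_strip_versions requirements (strip_versions requirements)

-- ===== LEMMAS AND PROOFS =====

-- the char-level pattern list of A
def pvPlist : List (List Char) := [['>','='], ['<','='], ['=','='], ['!','='], ['~','='], ['>'], ['<'], ['=','=','=']]

-- A's inner min-fold, at the char level
def pvMinstep (s : List Char) (first : Int) (p : List Char) : Int :=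
  if PySem.Chars.find s p ≠ -1 ∧ PySem.Chars.find s p < first then PySem.Chars.find s p else first

lemma pv_find_eq_of {s p : List Char} {k : Nat} (h1 : p <+: s.drop k)
    (h2 : ∀ i < k, ¬ p <+: s.drop i) : PySem.Chars.find s p = (k : Int) := by
  have hinf : p <:+: s := h1.isInfix.trans (List.drop_suffix k s).isInfix
  have h0 : 0 ≤ PySem.Chars.find s p := (PySem.Chars.find_nonneg_iff s p).mpr hinf
  obtain ⟨hp, hmin⟩ := PySem.Chars.find_spec h0
  rcases lt_trichotomy ((PySem.Chars.find s p).toNat) k with h | h | h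
  · exact absurd hp (h2 _ h)
  · omega
  · exact absurd h1 (hmin k h)

lemma pv_find_cons_zero {c : Char} {cs p : List Char} (h : p <+: (c :: cs)) :
    PySem.Chars.find (c :: cs) p = 0 := by
  have := pv_find_eq_of (s := c :: cs) (p := p) (k := 0) (by simpa using h) (by omega)
  simpa using this

lemma pv_find_cons_not_prefix {c : Char} {cs p : List Char} (h : ¬ p <+: (c :: cs)) :
    PySem.Chars.find (c :: cs) p =
      if PySem.Chars.find cs p = -1 then -1 else PySem.Chars.find cs p + 1 := by
  by_cases hin : p <:+: cs
  · have h0 : 0 ≤ PySem.Chars.find cs p := (PySem.Chars.find_nonneg_iff cs p).mpr hin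
    obtain ⟨hp, hmin⟩ := PySem.Chars.find_spec h0
    have hne : PySem.Chars.find cs p ≠ -1 := by omega
    have := pv_find_eq_of (s := c :: cs) (p := p) (k := (PySem.Chars.find cs p).toNat + 1)
      (by simpa using hp)
      (by
        intro i hi
        cases i with
        | zero => simpa using h
        | succ j => exact hmin j (by omega))
    rw [this]
    simp [hne]
    omega
  · have h1 : PySem.Chars.find cs p = -1 := (PySem.Chars.find_eq_neg_one_iff cs p).mpr hin
    have h2 : ¬ p <:+: (c :: cs) := by
      rw [List.infix_cons_iff]
      rintro (h' | h') <;> [exact h h'; exact hin h']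
    rw [(PySem.Chars.find_eq_neg_one_iff _ p).mpr h2, h1]
    simp

lemma pv_fold_nonneg (s : List Char) (ps : List (List Char)) :
    ∀ init : Int, 0 ≤ init → 0 ≤ ps.foldl (pvMinstep s) init := by
  induction ps with
  | nil => intro init h; simpa using h
  | cons a ps ih =>
    intro init h
    apply ih
    unfold pvMinstep
    have := PySem.Chars.neg_one_le_find s a
    split_ifs with hc
    · omega
    · exact h

lemma pv_fold_le_init (s : List Char) (ps : List (List Char)) :
    ∀ init : Int, ps.foldl (pvMinstep s) init ≤ init := by
  induction ps with
  | nil => intro init; simp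
  | cons a ps ih =>
    intro init
    have h1 := ih (pvMinstep s init a)
    have h2 : pvMinstep s init a ≤ init := by
      unfold pvMinstep; split_ifs with hc
      · exact le_of_lt hc.2
      · exact le_refl _
    calc (a :: ps).foldl (pvMinstep s) init = ps.foldl (pvMinstep s) (pvMinstep s init a) := by simp [List.foldl]
      _ ≤ pvMinstep s init a := h1
      _ ≤ init := h2

lemma pv_fold_le_zero {s p : List Char} {ps : List (List Char)} (hp : p ∈ ps)
    (h0 : PySem.Chars.find s p = 0) :
    ∀ init : Int, ps.foldl (pvMinstep s) init ≤ 0 := by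
  induction ps with
  | nil => cases hp
  | cons a ps ih =>
    intro init
    rcases List.mem_cons.mp hp with rfl | hmem
    · have hstep : pvMinstep s init p ≤ 0 := by
        unfold pvMinstep; rw [h0]; split_ifs with hc
        · exact le_refl 0
        · have : ¬ 0 < init := fun hlt => hc ⟨by norm_num, hlt⟩
          omega
      calc (p :: ps).foldl (pvMinstep s) init = ps.foldl (pvMinstep s) (pvMinstep s init p) := by simp [List.foldl]
        _ ≤ pvMinstep s init p := pv_fold_le_init s ps _
        _ ≤ 0 := hstep
    · have : (a :: ps).foldl (pvMinstep s) init = ps.foldl (pvMinstep s) (pvMinstep s init a) := by simp [List.foldl]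
      rw [this]
      exact ih hmem _

lemma pv_fold_shift {c : Char} {cs : List Char} {ps : List (List Char)}
    (hnp : ∀ p ∈ ps, ¬ p <+: (c :: cs)) :
    ∀ init : Int, ps.foldl (pvMinstep (c :: cs)) (init + 1) = ps.foldl (pvMinstep cs) init + 1 := by
  induction ps with
  | nil => intro init; simp
  | cons a ps ih =>
    intro init
    have hstep : pvMinstep (c :: cs) (init + 1) a = pvMinstep cs init a + 1 := by
      unfold pvMinstep
      rw [pv_find_cons_not_prefix (hnp a List.mem_cons_self)]
      have := PySem.Chars.neg_one_le_find cs a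
      by_cases hm : PySem.Chars.find cs a = -1
      · simp [hm]
      · simp only [if_neg hm]
        split_ifs with h1 h2 h2 <;> omega
    calc (a :: ps).foldl (pvMinstep (c :: cs)) (init + 1)
        = ps.foldl (pvMinstep (c :: cs)) (pvMinstep (c :: cs) (init + 1) a) := by simp [List.foldl]
      _ = ps.foldl (pvMinstep (c :: cs)) (pvMinstep cs init a + 1) := by rw [hstep]
      _ = ps.foldl (pvMinstep cs) (pvMinstep cs init a) + 1 := ih (fun p hp => hnp p (List.mem_cons_of_mem _ hp)) _
      _ = (a :: ps).foldl (pvMinstep cs) init + 1 := by simp [List.foldl]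

lemma pv_head_of_prefix {x : Char} {rest cs : List Char} (h : (x :: rest) <+: cs) :
    cs.head? = some x := by
  cases cs with
  | nil => simp at h
  | cons d ds =>
    rw [List.cons_prefix_cons] at h
    simp [← h.1]

lemma pv_exists_prefix_iff (c : Char) (cs : List Char) :
    (∃ p ∈ pvPlist, p <+: (c :: cs)) ↔
      ((c = '<' ∨ c = '>') ∨ ((c = '=' ∨ c = '!' ∨ c = '~') ∧ cs.head? = some '=')) := by
  constructor
  · rintro ⟨p, hp, hpre⟩
    simp only [pvPlist, List.mem_cons, List.not_mem_nil, or_false] at hp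
    rcases hp with rfl | rfl | rfl | rfl | rfl | rfl | rfl | rfl <;>
      rw [List.cons_prefix_cons] at hpre
    · exact Or.inl (Or.inr hpre.1.symm)
    · exact Or.inl (Or.inl hpre.1.symm)
    · exact Or.inr ⟨Or.inl hpre.1.symm, pv_head_of_prefix hpre.2⟩
    · exact Or.inr ⟨Or.inr (Or.inl hpre.1.symm), pv_head_of_prefix hpre.2⟩
    · exact Or.inr ⟨Or.inr (Or.inr hpre.1.symm), pv_head_of_prefix hpre.2⟩
    · exact Or.inl (Or.inr hpre.1.symm)
    · exact Or.inl (Or.inl hpre.1.symm)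
    · exact Or.inr ⟨Or.inl hpre.1.symm, pv_head_of_prefix hpre.2⟩
  · rintro (h | ⟨h1, h2⟩)
    · rcases h with rfl | rfl
      · exact ⟨['<'], by simp [pvPlist], by simp [List.cons_prefix_cons]⟩
      · exact ⟨['>'], by simp [pvPlist], by simp [List.cons_prefix_cons]⟩
    · cases cs with
      | nil => simp at h2
      | cons d ds =>
        have hd : d = '=' := by simpa using h2
        subst hd
        rcases h1 with rfl | rfl | rfl
        · exact ⟨['=','='], by simp [pvPlist], by simp [List.cons_prefix_cons]⟩
        · exact ⟨['!','='], by simp [pvPlist], by simp [List.cons_prefix_cons]⟩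
        · exact ⟨['~','='], by simp [pvPlist], by simp [List.cons_prefix_cons]⟩

lemma pv_idx_eq (cs : List Char) :
    pvPlist.foldl (pvMinstep cs) ((cs.length : Int)) = (specScan cs : Int) := by
  induction cs with
  | nil => decide
  | cons c cs ih =>
    by_cases h : (c = '<' ∨ c = '>') ∨ ((c = '=' ∨ c = '!' ∨ c = '~') ∧ cs.head? = some '=')
    · obtain ⟨p, hp, hpre⟩ := (pv_exists_prefix_iff c cs).mpr h
      have h0 : PySem.Chars.find (c :: cs) p = 0 := pv_find_cons_zero hpre
      have hle := pv_fold_le_zero hp h0 (((c :: cs).length : Int))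
      have hge := pv_fold_nonneg (c :: cs) pvPlist (((c :: cs).length : Int)) (by positivity)
      have hscan : specScan (c :: cs) = 0 := by
        rcases h with (rfl | rfl) | ⟨(rfl | rfl | rfl), h2⟩
        · simp [specScan]
        · simp [specScan]
        · simp [specScan, h2]
        · simp [specScan, h2]
        · simp [specScan, h2]
      rw [hscan]
      omega
    · have hnp : ∀ p ∈ pvPlist, ¬ p <+: (c :: cs) :=
        fun p hp hpre => h ((pv_exists_prefix_iff c cs).mp ⟨p, hp, hpre⟩)
      have hlen : (((c :: cs).length : Int)) = (cs.length : Int) + 1 := by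
        simp [List.length_cons]
      have hA : ¬ (c = '<' ∨ c = '>') := fun hx => h (Or.inl hx)
      have hB : ¬ ((c = '=' ∨ c = '!' ∨ c = '~') ∧ cs.head? = some '=') := fun hx => h (Or.inr hx)
      have hscan : specScan (c :: cs) = specScan cs + 1 := by
        simp only [specScan]
        rw [if_neg hA, if_neg hB]
      rw [hlen, pv_fold_shift hnp, ih, hscan]
      push_cast
      ring

lemma pv_afold_eq (req : String) :
    ([">=", "<=", "==", "!=", "~=", ">", "<", "==="] : List String).foldl
      (fun first pattern =>
        let pos := PySem.Str.find req pattern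
        if pos ≠ -1 ∧ pos < first then pos else first) (PySem.Str.len req)
    = pvPlist.foldl (pvMinstep req.toList) ((req.toList.length : Int)) := by
  rfl

-- ===== VERDICT (by name: the statement is the Claim_ definition above) =====
theorem strip_versions_spec : Claim_equal_strip_versions := by
  intro requirements _
  unfold Spec_strip_versions strip_versions strip_versions_alt
  rw [PySem.List.foldl_append_singleton_eq_map
    (fun req =>
      let first_spec_index : Int :=
        ([">=", "<=", "==", "!=", "~=", ">", "<", "==="] : List String).foldl
          (fun first pattern =>
            let pos := PySem.Str.find req pattern
            if pos ≠ -1 ∧ pos < first then pos else first) (PySem.Str.len req)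
      PySem.Str.slice (PySem.Str.strip (PySem.Str.slice req none (some first_spec_index))) (some 1) none)
    requirements []]
  rw [List.nil_append]
  apply List.map_congr_left
  intro req _
  simp only
  rw [pv_afold_eq, pv_idx_eq]
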